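-- pv_equiv track=rewrite | github.com/marcant-oss/shorewall-nft | packages/shorewall-nft/shorewall_nft/verify/triangle.py | _split_zone_pair
-- ===== SOURCE A (Python) =====
-- def _split_zone_pair(chain_name: str, sep: str,
--                      known_zones: set[str]) -> tuple[str, str] | None:
--     """Split a chain name into (src_zone, dst_zone).
--
--     Tries every position of the separator, accepting only splits
--     where both halves are known zones. This handles zone names
--     containing the separator (e.g. 'zone2x' with separator '2').
--     """
--     positions = []
--     start = 0
--     while True:
--         pos = chain_name.find(sep, start)
--         if pos < 0:
--             break
--         positions.append(pos)
--         start = pos + len(sep)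
--
--     for pos in positions:
--         src = chain_name[:pos]
--         dst = chain_name[pos + len(sep):]
--         if src in known_zones and dst in known_zones:
--             return (src, dst)
--
--     return None
-- ===== SOURCE B (Python) =====
-- def _split_zone_pair(chain_name: str, sep: str,
--                      known_zones: set[str]) -> tuple[str, str] | None:
--     """Split a chain name into (src_zone, dst_zone).
--
--     Zone-indexed prefix matching: a zone z is a valid source exactly
--     when chain_name starts with z + sep and the remaining suffix is
--     itself a known zone.  Keep the shortest valid source (= the
--     leftmost split point); set iteration order does not matter, since
--     two valid sources of equal length are the same prefix string.
--     """
--     best = None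
--     for z in known_zones:
--         if (best is None or len(z) < len(best)) \
--                 and chain_name.startswith(z + sep) \
--                 and chain_name[len(z) + len(sep):] in known_zones:
--             best = z
--     if best is None:
--         return None
--     return (best, chain_name[len(best) + len(sep):])
-- ===== Notes on version B (the rewrite author's own statement) =====
-- stated objective: alternative
-- what changed: B drops A's two staged passes (str.find scan collecting non-overlapping separator positions, then slicing the chain at each) and instead iterates over known_zones, testing each zone z as a source via chain_name.startswith(z + sep) with the suffix checked for zone membership, keeping the shortest valid source (the leftmost split); Pre_ excludes sep == '', where A's find-scan never terminates.
-- intended difference: On chains whose leftmost valid split position is an occurrence of a self-overlapping sep that A's non-overlapping find-scan skips (e.g. 'aaaa' with sep 'aa' and zone 'a'), A returns a later valid split or None while B returns that leftmost valid split, which is intended since A's docstring promises to try every separator position. — e.g. on _split_zone_pair("aaaa", "aa", ["a"]): A returns none, B returns some ("a", "a")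
import Mathlib
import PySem

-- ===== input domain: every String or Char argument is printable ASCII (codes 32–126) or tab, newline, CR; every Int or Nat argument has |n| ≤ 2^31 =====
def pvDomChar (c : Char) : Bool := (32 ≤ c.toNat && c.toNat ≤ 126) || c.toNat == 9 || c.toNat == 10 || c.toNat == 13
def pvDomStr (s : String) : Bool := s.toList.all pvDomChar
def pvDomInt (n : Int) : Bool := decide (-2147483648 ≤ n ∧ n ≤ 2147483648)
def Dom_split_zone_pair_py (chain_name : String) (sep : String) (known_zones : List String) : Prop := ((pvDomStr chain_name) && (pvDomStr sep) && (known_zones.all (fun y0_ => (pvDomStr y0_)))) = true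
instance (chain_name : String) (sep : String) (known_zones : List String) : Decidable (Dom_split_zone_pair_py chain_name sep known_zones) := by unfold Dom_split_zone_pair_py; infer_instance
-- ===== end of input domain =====

-- B replaces A's two staged passes (find-scan collecting non-overlapping separator positions, then
-- slicing at each) with one pass over known_zones testing each zone as a prefix source and keeping the
-- shortest valid one (alternative algorithm, O(zones*n) instead of O(occurrences*n), no speed claim);
-- on chains whose leftmost valid split sits at an occurrence A's non-overlapping scan skips, B returns
-- that split (intended) where A does not (D_).

-- ===== PORT A =====
-- A's first while-loop: scan for the non-overlapping occurrences of sep with chain_name.find(sep, start),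
-- collecting the positions. Fueled recursion: each found occurrence advances start by len(sep) ≥ 1, so
-- fuel = len(chain) + 1 is never exhausted when sep ≠ '' (on sep = '' the Python loop never terminates).
def pvPosLoopA (cs sep : List Char) : Nat → Int → List Int → List Int
  | 0, _, acc => acc.reverse
  | fuel + 1, start, acc =>
      let pos := PySem.Chars.findFrom cs sep start none
      if pos < 0 then acc.reverse
      else pvPosLoopA cs sep fuel (pos + sep.length) (pos :: acc)

-- A's second loop: for pos in positions, slice chain_name at pos and test set membership, first hit wins.
def pvTryPosA (cs sep : List Char) (known_zones : List String) : List Int → Option (String × String)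
  | [] => none
  | pos :: rest =>
      let src := String.ofList (PySem.List.slice cs none (some pos))
      let dst := String.ofList (PySem.List.slice cs (some (pos + sep.length)) none)
      if src ∈ known_zones ∧ dst ∈ known_zones then some (src, dst)
      else pvTryPosA cs sep known_zones rest

def split_zone_pair_py (chain_name : String) (sep : String) (known_zones : List String) : Option (String × String) :=
  let cs := chain_name.toList
  let sp := sep.toList
  pvTryPosA cs sp known_zones (pvPosLoopA cs sp (cs.length + 1) 0 [])

-- ===== PORT B =====
-- B's for-loop over z in known_zones keeping the shortest valid source zone in best; Python len(z)
-- is the character count z.toList.length (exact). The result is independent of the iteration order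
-- (two valid sources of equal length are the same prefix of chain_name), so iterating the set's
-- carrier list is faithful to Python's set iteration.
def pvLoopB (cs sp : List Char) (zs : List String) : List String → Option String → Option String
  | [], best => best
  | z :: rest, best =>
      pvLoopB cs sp zs rest
        (if ((match best with
              | none => true
              | some b => decide (z.toList.length < b.toList.length)) &&
             PySem.Chars.startswith cs (z.toList ++ sp) &&
             decide (String.ofList (PySem.List.slice cs (some ((z.toList.length + sp.length : Nat) : Int)) none) ∈ zs))
         then some z else best)

def split_zone_pair_py_alt (chain_name : String) (sep : String) (known_zones : List String) : Option (String × String) :=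
  match pvLoopB chain_name.toList sep.toList known_zones known_zones none with
  | none => none
  | some best =>
      some (best, String.ofList (PySem.List.slice chain_name.toList
        (some ((best.toList.length + sep.toList.length : Nat) : Int)) none))

-- ===== PRECONDITION & SPEC =====
-- helper for D_ (an input property, used by neither port): the leftmost position at which chain_name
-- splits into two known zones around an occurrence of sep — i.e. the least length of a known zone z
-- with z + sep a prefix of chain_name and the remaining suffix a known zone.
def pvMinValid (cs sp : List Char) (zs : List String) : Option Nat :=
  ((zs.filter fun z => (z.toList ++ sp).isPrefixOf cs &&
      zs.contains (String.ofList (cs.drop (z.toList.length + sp.length)))).map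
    fun z => z.toList.length).min?

-- Pre_ excludes exactly sep = '': there A's position scan loops forever (find('', start) returns start,
-- which never advances), so A returns on no such input; B returns a value there.
def Pre_split_zone_pair_py (chain_name : String) (sep : String) (known_zones : List String) : Prop := sep ≠ ""
instance (chain_name : String) (sep : String) (known_zones : List String) : Decidable (Pre_split_zone_pair_py chain_name sep known_zones) := by unfold Pre_split_zone_pair_py; infer_instance

def pvWitness_split_zone_pair_py : String × String × List String := ("a2b", "2", ["a", "b"])

-- D_: the leftmost both-halves-known split position p of chain_name is an occurrence of sep that the
-- non-overlapping left-to-right scan skips (possible only for self-overlapping sep) — equivalently the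
-- non-overlapping occurrence count of sep does not grow when the prefix is extended to cover p's
-- occurrence; there A returns a later valid split or None while B returns that leftmost valid split,
-- which is intended — A's own docstring promises to try every separator position.
def D_split_zone_pair_py (chain_name : String) (sep : String) (known_zones : List String) : Prop :=
  ∃ p ∈ pvMinValid chain_name.toList sep.toList known_zones,
    PySem.Chars.count (chain_name.toList.take (p + sep.toList.length)) sep.toList
      = PySem.Chars.count (chain_name.toList.take (p + sep.toList.length - 1)) sep.toList
instance (chain_name : String) (sep : String) (known_zones : List String) : Decidable (D_split_zone_pair_py chain_name sep known_zones) := by unfold D_split_zone_pair_py; infer_instance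

def Spec_split_zone_pair_py (chain_name : String) (sep : String) (known_zones : List String) (out : Option (String × String)) : Prop := ¬ D_split_zone_pair_py chain_name sep known_zones → out = split_zone_pair_py_alt chain_name sep known_zones
instance (chain_name : String) (sep : String) (known_zones : List String) (out : Option (String × String)) : Decidable (Spec_split_zone_pair_py chain_name sep known_zones out) := by unfold Spec_split_zone_pair_py; infer_instance

def pvDiffWitness_split_zone_pair_py : String × String × List String := ("aaaa", "aa", ["a"])
def pvDiffWitnessOut_split_zone_pair_py : (Option (String × String)) × (Option (String × String)) :=
  (none, some ("a", "a"))

-- ===== CLAIM (what is proved, stated in full; the proofs are below) =====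
def Claim_unchanged_split_zone_pair_py : Prop := ∀ (chain_name : String) (sep : String) (known_zones : List String), Dom_split_zone_pair_py chain_name sep known_zones → Pre_split_zone_pair_py chain_name sep known_zones → Spec_split_zone_pair_py chain_name sep known_zones (split_zone_pair_py chain_name sep known_zones)
def Claim_changed_split_zone_pair_py : Prop := Dom_split_zone_pair_py (pvDiffWitness_split_zone_pair_py.1) (pvDiffWitness_split_zone_pair_py.2.1) (pvDiffWitness_split_zone_pair_py.2.2) ∧ Pre_split_zone_pair_py (pvDiffWitness_split_zone_pair_py.1) (pvDiffWitness_split_zone_pair_py.2.1) (pvDiffWitness_split_zone_pair_py.2.2) ∧ D_split_zone_pair_py (pvDiffWitness_split_zone_pair_py.1) (pvDiffWitness_split_zone_pair_py.2.1) (pvDiffWitness_split_zone_pair_py.2.2) ∧ split_zone_pair_py (pvDiffWitness_split_zone_pair_py.1) (pvDiffWitness_split_zone_pair_py.2.1) (pvDiffWitness_split_zone_pair_py.2.2) = pvDiffWitnessOut_split_zone_pair_py.1 ∧ split_zone_pair_py_alt (pvDiffWitness_split_zone_pair_py.1) (pvDiffWitness_split_zone_pair_py.2.1) (pvDiffWitness_split_zone_pair_py.2.2)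 = pvDiffWitnessOut_split_zone_pair_py.2 ∧ pvDiffWitnessOut_split_zone_pair_py.1 ≠ pvDiffWitnessOut_split_zone_pair_py.2
def Claim_exact_split_zone_pair_py : Prop := ∀ (chain_name : String) (sep : String) (known_zones : List String), Dom_split_zone_pair_py chain_name sep known_zones → Pre_split_zone_pair_py chain_name sep known_zones → D_split_zone_pair_py chain_name sep known_zones → split_zone_pair_py chain_name sep known_zones ≠ split_zone_pair_py_alt chain_name sep known_zones

-- ===== LEMMAS AND PROOFS =====

-- proof-side name for pvMinValid's predicate (definitionally the lambda in pvMinValid)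
def pvValidSplit (cs sp : List Char) (zs : List String) (p : Nat) : Bool :=
  sp.isPrefixOf (cs.drop p) && zs.contains (String.ofList (cs.take p)) &&
    zs.contains (String.ofList (cs.drop (p + sp.length)))

-- B's per-zone test: z is a valid source zone (this is also pvMinValid's filter predicate)
def pvPz (cs sp : List Char) (zs : List String) (z : String) : Bool :=
  (z.toList ++ sp).isPrefixOf cs && zs.contains (String.ofList (cs.drop (z.toList.length + sp.length)))

theorem pv_minValid_def (cs sp : List Char) (zs : List String) :
    pvMinValid cs sp zs = ((zs.filter (pvPz cs sp zs)).map fun z => z.toList.length).min? := rfl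

-- proof-side greedy occurrence list (Nat mirror of A's Int position scan)
def pvGreedyOcc (cs sp : List Char) : Nat → Nat → List Nat
  | 0, _ => []
  | f + 1, s =>
      let q := PySem.Chars.find (cs.drop s) sp
      if q < 0 then [] else (s + q.toNat) :: pvGreedyOcc cs sp f (s + q.toNat + sp.length)

theorem pv_sep_len (sep : List Char) (hs : sep ≠ []) : 1 ≤ sep.length := by
  cases sep <;> simp_all

theorem pv_find_facts (sep cs : List Char) (hs : sep ≠ []) (h : ¬ PySem.Chars.find cs sep < 0) :
    (PySem.Chars.find cs sep).toNat + sep.length ≤ cs.length ∧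
    cs = cs.take (PySem.Chars.find cs sep).toNat ++ sep ++ cs.drop ((PySem.Chars.find cs sep).toNat + sep.length) := by
  have h0 : 0 ≤ PySem.Chars.find cs sep := by omega
  obtain ⟨hpre, -⟩ := PySem.Chars.find_spec (s := cs) (sub := sep) h0
  set p := (PySem.Chars.find cs sep).toNat with hp
  obtain ⟨t, ht⟩ := hpre
  have hlen : sep.length + t.length = cs.length - p := by
    have := congrArg List.length ht; simpa using this
  have hple : p ≤ cs.length := by
    have := PySem.Chars.find_le_length (s := cs) (sub := sep)
    omega
  have hcs : cs.length - p + p = cs.length := by omega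
  constructor
  · have htne : sep.length ≥ 1 := by cases sep <;> simp_all
    omega
  · have hdrop : cs.drop (p + sep.length) = t := by
      have : cs.drop (p + sep.length) = (cs.drop p).drop sep.length := by
        simp [List.drop_drop, Nat.add_comm]
      rw [this, ← ht, List.drop_left]
    rw [hdrop]
    conv_lhs => rw [← List.take_append_drop p cs, ← ht]
    simp

theorem pv_posLoop_acc (cs sep : List Char) :
    ∀ (fuel : Nat) (start : Int) (acc : List Int),
      pvPosLoopA cs sep fuel start acc = acc.reverse ++ pvPosLoopA cs sep fuel start [] := by
  intro fuel
  induction fuel with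
  | zero => intro start acc; simp [pvPosLoopA]
  | succ fuel ih =>
    intro start acc
    simp only [pvPosLoopA]
    by_cases hneg : PySem.Chars.findFrom cs sep start none < 0
    · simp [hneg]
    · rw [if_neg hneg, if_neg hneg, ih _ (_ :: acc), ih _ [_]]
      simp

-- A's position scan equals the greedy non-overlapping occurrence list (cast to Int)
theorem pv_posLoop_greedy (cs sp : List Char) (hs : sp ≠ []) :
    ∀ (fuel s : Nat), s ≤ cs.length →
      pvPosLoopA cs sp fuel (s : Int) [] = (pvGreedyOcc cs sp fuel s).map (Nat.cast : Nat → Int) := by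
  intro fuel
  induction fuel with
  | zero => intro s hs'; simp [pvPosLoopA, pvGreedyOcc]
  | succ fuel ih =>
    intro s hs'
    have hff := PySem.Chars.findFrom_natCast cs sp s hs'
    by_cases hneg : PySem.Chars.find (cs.drop s) sp = -1
    · have hinner : PySem.Chars.findFrom cs sp (s : Int) none = -1 := by rw [hff, if_pos hneg]
      simp only [pvPosLoopA, pvGreedyOcc, hinner]
      rw [if_pos (by norm_num), if_pos (by omega)]
      simp
    · have hge : 0 ≤ PySem.Chars.find (cs.drop s) sp := by
        have := PySem.Chars.neg_one_le_find (s := cs.drop s) (sub := sp)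
        omega
      have hinner : PySem.Chars.findFrom cs sp (s : Int) none
          = (s : Int) + PySem.Chars.find (cs.drop s) sp := by rw [hff, if_neg hneg]
      simp only [pvPosLoopA, pvGreedyOcc, hinner]
      rw [if_neg (by omega), if_neg (by omega)]
      set q := (PySem.Chars.find (cs.drop s) sp).toNat with hq
      obtain ⟨hle, -⟩ := pv_find_facts sp (cs.drop s) hs (by omega)
      have hlen : (cs.drop s).length = cs.length - s := by simp
      have harg : (s : Int) + PySem.Chars.find (cs.drop s) sp + (sp.length : Int)
          = ((s + q + sp.length : Nat) : Int) := by push_cast; omega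
      rw [pv_posLoop_acc cs sp fuel _ [_], harg, ih (s + q + sp.length) (by omega)]
      have hpos : (s : Int) + PySem.Chars.find (cs.drop s) sp = ((s + q : Nat) : Int) := by
        push_cast; omega
      simp [hpos]

-- first valid candidate among a list of (Nat) positions, A's second loop restated on Nat positions
def pvFirstNat (cs sp : List Char) (zs : List String) : List Nat → Option (String × String)
  | [] => none
  | p :: rest =>
      if String.ofList (cs.take p) ∈ zs ∧ String.ofList (cs.drop (p + sp.length)) ∈ zs
      then some (String.ofList (cs.take p), String.ofList (cs.drop (p + sp.length)))
      else pvFirstNat cs sp zs rest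

theorem pv_tryPos_firstNat (cs sp : List Char) (zs : List String) (ps : List Nat) :
    pvTryPosA cs sp zs (ps.map (Nat.cast : Nat → Int)) = pvFirstNat cs sp zs ps := by
  induction ps with
  | nil => simp [pvTryPosA, pvFirstNat]
  | cons p rest ih =>
    have h1 : PySem.List.slice cs none (some ((p : Nat) : Int)) = cs.take p :=
      PySem.List.slice_to_natCast cs p
    have h2 : PySem.List.slice cs (some (((p : Nat) : Int) + (sp.length : Int))) none
        = cs.drop (p + sp.length) := by
      have : ((p : Nat) : Int) + (sp.length : Int) = ((p + sp.length : Nat) : Int) := by push_cast; ring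
      rw [this, PySem.List.slice_from_natCast]
    simp only [pvTryPosA, pvFirstNat, List.map_cons, h1, h2, ih]

theorem pv_A_char (chain_name sep : String) (zs : List String) (hs : sep.toList ≠ []) :
    split_zone_pair_py chain_name sep zs
      = pvFirstNat chain_name.toList sep.toList zs
          (pvGreedyOcc chain_name.toList sep.toList (chain_name.toList.length + 1) 0) := by
  show pvTryPosA chain_name.toList sep.toList zs
      (pvPosLoopA chain_name.toList sep.toList (chain_name.toList.length + 1) 0 []) = _
  have h0 : (0 : Int) = ((0 : Nat) : Int) := by norm_num
  rw [h0, pv_posLoop_greedy chain_name.toList sep.toList hs _ 0 (by omega), pv_tryPos_firstNat]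

-- greedy list properties
theorem pv_greedy_ge (cs sp : List Char) :
    ∀ (fuel s : Nat), ∀ p ∈ pvGreedyOcc cs sp fuel s, s ≤ p := by
  intro fuel
  induction fuel with
  | zero => intro s p hp; simp [pvGreedyOcc] at hp
  | succ fuel ih =>
    intro s p hp
    simp only [pvGreedyOcc] at hp
    split_ifs at hp with h
    · simp at hp
    · rcases List.mem_cons.mp hp with h1 | h1
      · omega
      · have := ih _ p h1; omega

theorem pv_greedy_sorted (cs sp : List Char) (hs : sp ≠ []) :
    ∀ (fuel s : Nat), (pvGreedyOcc cs sp fuel s).Pairwise (· < ·) := by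
  intro fuel
  induction fuel with
  | zero => intro s; simp [pvGreedyOcc]
  | succ fuel ih =>
    intro s
    simp only [pvGreedyOcc]
    split_ifs with h
    · simp
    · refine List.pairwise_cons.mpr ⟨?_, ih _⟩
      intro p hp
      have h1 := pv_greedy_ge cs sp fuel _ p hp
      have h2 := pv_sep_len sp hs
      omega

theorem pv_greedy_occ (cs sp : List Char) (hs : sp ≠ []) :
    ∀ (fuel s : Nat), ∀ p ∈ pvGreedyOcc cs sp fuel s, sp <+: cs.drop p := by
  intro fuel
  induction fuel with
  | zero => intro s p hp; simp [pvGreedyOcc] at hp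
  | succ fuel ih =>
    intro s p hp
    simp only [pvGreedyOcc] at hp
    split_ifs at hp with h
    · simp at hp
    · rcases List.mem_cons.mp hp with h1 | h1
      · subst h1
        obtain ⟨hle, hdec⟩ := pv_find_facts sp (cs.drop s) hs h
        set q := (PySem.Chars.find (cs.drop s) sp).toNat with hq
        have hdd : cs.drop (s + q) = (cs.drop s).drop q := by
          rw [List.drop_drop, Nat.add_comm]
        rw [hdd]
        have hlen : ((cs.drop s).take q).length = q := by
          have hds : (cs.drop s).length = cs.length - s := by simp
          simp; omega
        have : (cs.drop s).drop q = sp ++ (cs.drop s).drop (q + sp.length) := by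
          conv_lhs => rw [hdec]
          rw [List.append_assoc, List.drop_left' hlen]
        rw [this]
        exact ⟨_, rfl⟩
      · exact ih _ p h1

-- valid-position basic facts
theorem pv_valid_le (cs sp : List Char) (zs : List String) (p : Nat) (hs : sp ≠ [])
    (h : pvValidSplit cs sp zs p = true) : p + sp.length ≤ cs.length := by
  simp only [pvValidSplit, Bool.and_eq_true] at h
  have hpre : sp <+: cs.drop p := List.isPrefixOf_iff_prefix.mp h.1.1
  have h1 := hpre.length_le
  have h2 := pv_sep_len sp hs
  simp at h1
  omega

theorem pv_valid_mem (cs sp : List Char) (zs : List String) (p : Nat)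
    (h : pvValidSplit cs sp zs p = true) :
    String.ofList (cs.take p) ∈ zs ∧ String.ofList (cs.drop (p + sp.length)) ∈ zs := by
  simp only [pvValidSplit, Bool.and_eq_true, List.contains_iff_mem] at h
  exact ⟨h.1.2, h.2⟩

theorem pv_valid_of_occ_mem (cs sp : List Char) (zs : List String) (p : Nat)
    (hocc : sp <+: cs.drop p)
    (h1 : String.ofList (cs.take p) ∈ zs) (h2 : String.ofList (cs.drop (p + sp.length)) ∈ zs) :
    pvValidSplit cs sp zs p = true := by
  simp only [pvValidSplit, Bool.and_eq_true, List.contains_iff_mem]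
  exact ⟨⟨List.isPrefixOf_iff_prefix.mpr hocc, h1⟩, h2⟩

theorem pv_Pz_take (cs sp : List Char) (zs : List String) (z : String)
    (h : pvPz cs sp zs z = true) : z.toList = cs.take z.toList.length := by
  simp only [pvPz, Bool.and_eq_true] at h
  have hpre : (z.toList ++ sp) <+: cs := List.isPrefixOf_iff_prefix.mp h.1
  have hz : z.toList <+: cs := (List.prefix_append z.toList sp).trans hpre
  exact List.prefix_iff_eq_take.mp hz

-- the valid-zone / valid-position correspondence
theorem pv_valid_of_Pz (cs sp : List Char) (zs : List String) (z : String)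
    (hz : z ∈ zs) (h : pvPz cs sp zs z = true) :
    pvValidSplit cs sp zs z.toList.length = true := by
  have htake := pv_Pz_take cs sp zs z h
  simp only [pvPz, Bool.and_eq_true, List.contains_iff_mem] at h
  obtain ⟨t, ht⟩ := List.isPrefixOf_iff_prefix.mp h.1
  have hdrop : cs.drop z.toList.length = sp ++ t := by
    have hlen : z.toList.length = z.toList.length := rfl
    rw [← ht, List.append_assoc, List.drop_left]
  apply pv_valid_of_occ_mem
  · rw [hdrop]; exact ⟨t, rfl⟩
  · rw [← htake, String.ofList_toList]; exact hz
  · exact h.2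

theorem pv_Pz_of_valid (cs sp : List Char) (zs : List String) (p : Nat) (hs : sp ≠ [])
    (h : pvValidSplit cs sp zs p = true) :
    String.ofList (cs.take p) ∈ zs ∧ pvPz cs sp zs (String.ofList (cs.take p)) = true ∧
      (String.ofList (cs.take p)).toList.length = p := by
  have hle := pv_valid_le cs sp zs p hs h
  have hsl := pv_sep_len sp hs
  have hplen : (cs.take p).length = p := by simp; omega
  have htl : (String.ofList (cs.take p)).toList = cs.take p := String.toList_ofList
  simp only [pvValidSplit, Bool.and_eq_true, List.contains_iff_mem] at h
  refine ⟨h.1.2, ?_, by rw [htl, hplen]⟩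
  simp only [pvPz, Bool.and_eq_true, List.contains_iff_mem, htl, hplen]
  constructor
  · apply List.isPrefixOf_iff_prefix.mpr
    obtain ⟨t, ht⟩ := List.isPrefixOf_iff_prefix.mp h.1.1
    refine ⟨t, ?_⟩
    rw [List.append_assoc, ht, List.take_append_drop]
  · exact h.2

theorem pv_minValid_some (cs sp : List Char) (zs : List String) (p : Nat) (hs : sp ≠ [])
    (h : pvMinValid cs sp zs = some p) :
    pvValidSplit cs sp zs p = true ∧ ∀ q, pvValidSplit cs sp zs q = true → p ≤ q := by
  rw [pv_minValid_def] at h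
  obtain ⟨hmem, hmin⟩ := List.min?_eq_some_iff.mp h
  obtain ⟨z, hzf, hlen⟩ := List.mem_map.mp hmem
  obtain ⟨hz, hPz⟩ := List.mem_filter.mp hzf
  constructor
  · rw [← hlen]
    exact pv_valid_of_Pz cs sp zs z hz hPz
  · intro q hq
    obtain ⟨hmemq, hPzq, hlenq⟩ := pv_Pz_of_valid cs sp zs q hs hq
    refine hmin q (List.mem_map.mpr ⟨String.ofList (cs.take q), List.mem_filter.mpr ⟨hmemq, hPzq⟩, hlenq⟩)

theorem pv_minValid_none (cs sp : List Char) (zs : List String) (hs : sp ≠ [])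
    (h : pvMinValid cs sp zs = none) : ∀ q, pvValidSplit cs sp zs q = false := by
  rw [pv_minValid_def] at h
  intro q
  by_cases hq : pvValidSplit cs sp zs q = true
  · exfalso
    obtain ⟨hmemq, hPzq, hlenq⟩ := pv_Pz_of_valid cs sp zs q hs hq
    have : String.ofList (cs.take q) ∈ zs.filter (pvPz cs sp zs) :=
      List.mem_filter.mpr ⟨hmemq, hPzq⟩
    rw [List.map_eq_nil_iff.mp (List.min?_eq_none_iff.mp h)] at this
    simp at this
  · simpa using hq

-- B-side: the per-zone test, and the loop characterisation
theorem pv_loopB_step_cond (cs sp : List Char) (zs : List String) (z : String) :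
    (PySem.Chars.startswith cs (z.toList ++ sp) &&
      decide (String.ofList (PySem.List.slice cs (some ((z.toList.length + sp.length : Nat) : Int)) none) ∈ zs))
    = pvPz cs sp zs z := by
  have h1 : PySem.Chars.startswith cs (z.toList ++ sp) = (z.toList ++ sp).isPrefixOf cs := by
    by_cases h : (z.toList ++ sp) <+: cs
    · rw [(PySem.Chars.startswith_iff _ _).mpr h, (List.isPrefixOf_iff_prefix.mpr h)]
    · have e1 : PySem.Chars.startswith cs (z.toList ++ sp) = false := by
        rcases hb : PySem.Chars.startswith cs (z.toList ++ sp) with _ | _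
        · rfl
        · exact absurd ((PySem.Chars.startswith_iff _ _).mp hb) h
      have e2 : (z.toList ++ sp).isPrefixOf cs = false := by
        rcases hb : (z.toList ++ sp).isPrefixOf cs with _ | _
        · rfl
        · exact absurd (List.isPrefixOf_iff_prefix.mp hb) h
      rw [e1, e2]
  rw [h1, PySem.List.slice_from_natCast]
  simp only [pvPz]
  congr 1
  rw [Bool.eq_iff_iff]
  simp [List.contains_iff_mem]

-- minimum length of a valid source zone in a zone list
def pvMinLen (cs sp : List Char) (zs : List String) : List String → Option Nat
  | [] => none
  | z :: rest =>
      if pvPz cs sp zs z then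
        match pvMinLen cs sp zs rest with
        | none => some z.toList.length
        | some m => some (Nat.min z.toList.length m)
      else pvMinLen cs sp zs rest

def pvMerge : Option Nat → Option Nat → Option Nat
  | none, o => o
  | some n, none => some n
  | some n, some m => some (Nat.min n m)

theorem pv_loopB_char (cs sp : List Char) (zs : List String) :
    ∀ (rest : List String) (best : Option String),
      (∀ z, best = some z → z.toList = cs.take z.toList.length) →
      pvLoopB cs sp zs rest best
        = (pvMerge (best.map (fun z => z.toList.length)) (pvMinLen cs sp zs rest)).map
            (fun m => String.ofList (cs.take m)) := by
  intro rest
  induction rest with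
  | nil =>
    intro best hinv
    cases best with
    | none => simp [pvLoopB, pvMinLen, pvMerge]
    | some b =>
      simp only [pvLoopB, pvMinLen, pvMerge, Option.map_some]
      have := hinv b rfl
      rw [← this, String.ofList_toList]
  | cons z rest ih =>
    intro best hinv
    simp only [pvLoopB]
    rw [Bool.and_assoc, pv_loopB_step_cond]
    by_cases hpz : pvPz cs sp zs z = true
    · have hz : z.toList = cs.take z.toList.length := pv_Pz_take cs sp zs z hpz
      cases best with
      | none =>
        have hc : ((match (none : Option String) with
            | none => true
            | some b => decide (z.toList.length < b.toList.length)) && pvPz cs sp zs z) = true := by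
          simp [hpz]
        rw [hc, if_pos rfl, ih (some z) (by intro w hw; cases hw; exact hz)]
        simp only [pvMinLen, if_pos hpz, Option.map_none, Option.map_some, pvMerge]
        cases h : pvMinLen cs sp zs rest <;> simp [pvMerge]
      | some b =>
        by_cases hlt : z.toList.length < b.toList.length
        · have hc : ((match (some b : Option String) with
              | none => true
              | some b => decide (z.toList.length < b.toList.length)) && pvPz cs sp zs z) = true := by
            show (decide (z.toList.length < b.toList.length) && pvPz cs sp zs z) = true
            rw [decide_eq_true hlt, hpz]
            rfl
          rw [hc, if_pos rfl, ih (some z) (by intro w hw; cases hw; exact hz)]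
          simp only [pvMinLen, if_pos hpz, Option.map_some]
          cases h : pvMinLen cs sp zs rest with
          | none =>
            have e : Nat.min b.toList.length z.toList.length = z.toList.length := by
              simp only [Nat.min_def]; split_ifs <;> omega
            simp only [pvMerge, e]
          | some m =>
            have e : Nat.min b.toList.length (Nat.min z.toList.length m) = Nat.min z.toList.length m := by
              simp only [Nat.min_def]; split_ifs <;> omega
            simp only [pvMerge, e]
        · have hc : ((match (some b : Option String) with
              | none => true
              | some b => decide (z.toList.length < b.toList.length)) && pvPz cs sp zs z) = false := by
            show (decide (z.toList.length < b.toList.length) && pvPz cs sp zs z) = false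
            rw [decide_eq_false hlt]
            exact Bool.false_and _
          rw [hc, if_neg (by simp), ih (some b) hinv]
          simp only [pvMinLen, if_pos hpz, Option.map_some]
          cases h : pvMinLen cs sp zs rest with
          | none =>
            have e : Nat.min b.toList.length z.toList.length = b.toList.length := by
              simp only [Nat.min_def]; split_ifs <;> omega
            simp only [pvMerge, e]
          | some m =>
            have e : Nat.min b.toList.length (Nat.min z.toList.length m) = Nat.min b.toList.length m := by
              simp only [Nat.min_def]; split_ifs <;> omega
            simp only [pvMerge, e]
    · have hpz' : pvPz cs sp zs z = false := by simpa using hpz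
      rw [hpz', Bool.and_false, if_neg (by simp), ih best hinv]
      simp [pvMinLen, hpz']

theorem pv_minLen_spec (cs sp : List Char) (zs : List String) :
    ∀ (rest : List String),
      (∀ m, pvMinLen cs sp zs rest = some m →
        (∃ z ∈ rest, pvPz cs sp zs z = true ∧ z.toList.length = m) ∧
        (∀ z ∈ rest, pvPz cs sp zs z = true → m ≤ z.toList.length)) ∧
      (pvMinLen cs sp zs rest = none → ∀ z ∈ rest, pvPz cs sp zs z = false) := by
  intro rest
  induction rest with
  | nil => simp [pvMinLen]
  | cons z rest ih =>
    by_cases hpz : pvPz cs sp zs z = true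
    · constructor
      · intro m hm
        simp only [pvMinLen, hpz, if_pos rfl] at hm
        cases h : pvMinLen cs sp zs rest with
        | none =>
          rw [h] at hm
          cases hm
          constructor
          · exact ⟨z, List.mem_cons_self, hpz, rfl⟩
          · intro w hw hpw
            rcases List.mem_cons.mp hw with h1 | h1
            · subst h1; omega
            · exact absurd hpw (by simp [ih.2 h w h1])
        | some m' =>
          rw [h] at hm
          cases hm
          obtain ⟨⟨w0, hw0, hpw0, hlw0⟩, hmin⟩ := ih.1 m' h
          constructor
          · by_cases hc : z.toList.length ≤ m'
            · exact ⟨z, List.mem_cons_self, hpz, by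
                simp only [Nat.min_def]; split_ifs <;> omega⟩
            · exact ⟨w0, List.mem_cons_of_mem _ hw0, hpw0, by
                simp only [Nat.min_def]; split_ifs <;> omega⟩
          · intro w hw hpw
            rcases List.mem_cons.mp hw with h1 | h1
            · subst h1; simp only [Nat.min_def]; split_ifs <;> omega
            · have := hmin w h1 hpw
              simp only [Nat.min_def]; split_ifs <;> omega
      · intro hnone
        simp only [pvMinLen, hpz, if_pos rfl] at hnone
        cases h : pvMinLen cs sp zs rest <;> rw [h] at hnone <;> cases hnone
    · have hpz' : pvPz cs sp zs z = false := by simpa using hpz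
      constructor
      · intro m hm
        simp [pvMinLen, hpz'] at hm
        obtain ⟨⟨w0, hw0, hpw0, hlw0⟩, hmin⟩ := ih.1 m hm
        constructor
        · exact ⟨w0, List.mem_cons_of_mem _ hw0, hpw0, hlw0⟩
        · intro w hw hpw
          rcases List.mem_cons.mp hw with h1 | h1
          · subst h1; simp [hpz'] at hpw
          · exact hmin w h1 hpw
      · intro hnone
        simp [pvMinLen, hpz'] at hnone
        intro w hw
        rcases List.mem_cons.mp hw with h1 | h1
        · subst h1; exact hpz'
        · exact ih.2 hnone w h1

theorem pv_minLen_eq_minValid (cs sp : List Char) (zs : List String) (hs : sp ≠ []) :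
    pvMinLen cs sp zs zs = pvMinValid cs sp zs := by
  cases hL : pvMinLen cs sp zs zs with
  | none =>
    cases hV : pvMinValid cs sp zs with
    | none => rfl
    | some p =>
      exfalso
      have hval := (pv_minValid_some cs sp zs p hs hV).1
      obtain ⟨hmem, hPz, -⟩ := pv_Pz_of_valid cs sp zs p hs hval
      have := (pv_minLen_spec cs sp zs zs).2 hL _ hmem
      rw [hPz] at this; cases this
  | some m =>
    obtain ⟨⟨z, hz, hPz, hlz⟩, hmin⟩ := (pv_minLen_spec cs sp zs zs).1 m hL
    have hvalm : pvValidSplit cs sp zs m = true := by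
      rw [← hlz]; exact pv_valid_of_Pz cs sp zs z hz hPz
    cases hV : pvMinValid cs sp zs with
    | none =>
      exfalso
      have := pv_minValid_none cs sp zs hs hV m
      rw [hvalm] at this; cases this
    | some p =>
      obtain ⟨hvalp, hminp⟩ := pv_minValid_some cs sp zs p hs hV
      obtain ⟨hmem, hPzp, hlp⟩ := pv_Pz_of_valid cs sp zs p hs hvalp
      have h1 : p ≤ m := hminp m hvalm
      have h2 : m ≤ p := by
        have := hmin _ hmem hPzp
        omega
      congr 1
      omega

theorem pv_B_char (chain_name sep : String) (zs : List String) (hs : sep.toList ≠ []) :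
    split_zone_pair_py_alt chain_name sep zs
      = (pvMinValid chain_name.toList sep.toList zs).map
          (fun p => (String.ofList (chain_name.toList.take p),
                     String.ofList (chain_name.toList.drop (p + sep.toList.length)))) := by
  set cs := chain_name.toList
  set sp := sep.toList
  have hloop := pv_loopB_char cs sp zs zs none (by intro z hz; cases hz)
  simp only [Option.map_none, pvMerge] at hloop
  rw [pv_minLen_eq_minValid cs sp zs hs] at hloop
  show (match pvLoopB cs sp zs zs none with
        | none => none
        | some best => some (best, String.ofList (PySem.List.slice cs
            (some ((best.toList.length + sp.length : Nat) : Int)) none))) = _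
  rw [hloop]
  cases hV : pvMinValid cs sp zs with
  | none => simp
  | some p =>
    obtain ⟨hvalp, -⟩ := pv_minValid_some cs sp zs p hs hV
    have hle := pv_valid_le cs sp zs p hs hvalp
    have hlen : (String.ofList (cs.take p)).toList.length = p := by
      rw [String.toList_ofList]; simp; omega
    simp only [Option.map_some]
    rw [hlen, PySem.List.slice_from_natCast]

-- pvFirstNat facts
theorem pv_firstNat_none (cs sp : List Char) (zs : List String) (l : List Nat)
    (h : ∀ p ∈ l, ¬(String.ofList (cs.take p) ∈ zs ∧ String.ofList (cs.drop (p + sp.length)) ∈ zs)) :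
    pvFirstNat cs sp zs l = none := by
  induction l with
  | nil => rfl
  | cons p rest ih =>
    simp only [pvFirstNat]
    rw [if_neg (h p List.mem_cons_self)]
    exact ih (fun q hq => h q (List.mem_cons_of_mem _ hq))

theorem pv_firstNat_eq (cs sp : List Char) (zs : List String) (l : List Nat) (p : Nat)
    (hsort : l.Pairwise (· < ·)) (hp : p ∈ l)
    (hcond : String.ofList (cs.take p) ∈ zs ∧ String.ofList (cs.drop (p + sp.length)) ∈ zs)
    (hmin : ∀ q ∈ l, q < p → ¬(String.ofList (cs.take q) ∈ zs ∧ String.ofList (cs.drop (q + sp.length)) ∈ zs)) :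
    pvFirstNat cs sp zs l = some (String.ofList (cs.take p), String.ofList (cs.drop (p + sp.length))) := by
  induction l with
  | nil => simp at hp
  | cons x rest ih =>
    rcases List.pairwise_cons.mp hsort with ⟨hx, hrest⟩
    by_cases hcx : String.ofList (cs.take x) ∈ zs ∧ String.ofList (cs.drop (x + sp.length)) ∈ zs
    · have hxp : x = p := by
        rcases List.mem_cons.mp hp with h1 | h1
        · omega
        · have hlt : x < p := hx p h1
          exact absurd hcx (hmin x List.mem_cons_self hlt)
      subst hxp
      simp [pvFirstNat, hcx]
    · have hne : p ≠ x := by rintro rfl; exact hcx hcond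
      have hp' : p ∈ rest := by
        rcases List.mem_cons.mp hp with h1 | h1
        · exact absurd h1 hne
        · exact h1
      simp only [pvFirstNat, if_neg hcx]
      exact ih hrest hp' (fun q hq hlt => hmin q (List.mem_cons_of_mem _ hq) hlt)

theorem pv_firstNat_cases (cs sp : List Char) (zs : List String) (l : List Nat) :
    pvFirstNat cs sp zs l = none ∨
      ∃ g ∈ l, pvFirstNat cs sp zs l
          = some (String.ofList (cs.take g), String.ofList (cs.drop (g + sp.length))) ∧
        String.ofList (cs.take g) ∈ zs ∧ String.ofList (cs.drop (g + sp.length)) ∈ zs := by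
  induction l with
  | nil => exact Or.inl rfl
  | cons x rest ih =>
    by_cases hcx : String.ofList (cs.take x) ∈ zs ∧ String.ofList (cs.drop (x + sp.length)) ∈ zs
    · exact Or.inr ⟨x, List.mem_cons_self, by simp [pvFirstNat, hcx], hcx⟩
    · simp only [pvFirstNat, if_neg hcx]
      rcases ih with h | ⟨g, hg, he, hc⟩
      · exact Or.inl h
      · exact Or.inr ⟨g, List.mem_cons_of_mem _ hg, he, hc⟩

-- ===== the count ↔ greedy-scan bridge (for D_) =====
-- find on cons / shifted go positions (used to unfold Chars.find one character at a time)
theorem pv_find_shift (sep : List Char) (l : List Char) (k : Nat) :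
    PySem.Chars.find.go sep l k =
      if PySem.Chars.find.go sep l 0 < 0 then -1 else PySem.Chars.find.go sep l 0 + k := by
  induction l generalizing k with
  | nil =>
    simp only [PySem.Chars.find.go]
    split_ifs <;> simp_all
  | cons c rest ih =>
    simp only [PySem.Chars.find.go]
    by_cases hp : sep.isPrefixOf (c :: rest) = true
    · simp [hp]
    · simp only [hp]
      rw [ih (k+1), ih 1]
      split_ifs <;> push_cast <;> omega

theorem pv_find_nil (sep : List Char) (hs : sep ≠ []) : PySem.Chars.find [] sep = -1 := by
  simp [PySem.Chars.find, PySem.Chars.find.go, hs]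

theorem pv_find_cons_prefix (sep : List Char) (c : Char) (rest : List Char)
    (hp : sep.isPrefixOf (c :: rest) = true) : PySem.Chars.find (c :: rest) sep = 0 := by
  simp [PySem.Chars.find, PySem.Chars.find.go, hp]

theorem pv_find_cons_not_prefix (sep : List Char) (c : Char) (rest : List Char)
    (hp : ¬ sep.isPrefixOf (c :: rest) = true) :
    PySem.Chars.find (c :: rest) sep =
      if PySem.Chars.find rest sep < 0 then -1 else PySem.Chars.find rest sep + 1 := by
  simp only [PySem.Chars.find]
  conv_lhs => simp only [PySem.Chars.find.go, hp]
  rw [pv_find_shift]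
  simp

-- number of non-overlapping occurrences, by repeated find (fueled)
def pvOccCnt (sp : List Char) : Nat → List Char → Nat
  | 0, _ => 0
  | f + 1, l =>
      let q := PySem.Chars.find l sp
      if q < 0 then 0 else pvOccCnt sp f (l.drop (q.toNat + sp.length)) + 1

theorem pvOccCnt_succ (sp : List Char) (f : Nat) (l : List Char) :
    pvOccCnt sp (f + 1) l = if PySem.Chars.find l sp < 0 then 0
      else pvOccCnt sp f (l.drop ((PySem.Chars.find l sp).toNat + sp.length)) + 1 := rfl

theorem pv_occCnt_irrel (sp : List Char) (hs : sp ≠ []) :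
    ∀ (f1 : Nat), ∀ (f2 : Nat) (l : List Char), l.length < f1 → l.length < f2 →
      pvOccCnt sp f1 l = pvOccCnt sp f2 l := by
  intro f1
  induction f1 with
  | zero => intro f2 l h1 h2; omega
  | succ f1 ih =>
    intro f2 l h1 h2
    cases f2 with
    | zero => omega
    | succ f2 =>
      simp only [pvOccCnt]
      by_cases hneg : PySem.Chars.find l sp < 0
      · simp [hneg]
      · simp only [hneg, if_false]
        obtain ⟨hle, -⟩ := pv_find_facts sp l hs hneg
        have hk := pv_sep_len sp hs
        rw [ih f2 _ (by simp; omega) (by simp; omega)]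

theorem pv_go_occCnt (sp : List Char) (hs : sp ≠ []) :
    ∀ (fuel : Nat) (l : List Char) (acc : Nat), l.length ≤ fuel →
      PySem.Chars.count.go sp fuel l acc = acc + pvOccCnt sp (l.length + 1) l := by
  intro fuel
  induction fuel with
  | zero =>
    intro l acc h
    have : l = [] := by cases l <;> simp_all
    subst this
    simp [pvOccCnt, pv_find_nil sp hs]
    rfl
  | succ fuel ih =>
    intro l acc h
    cases l with
    | nil => simp [pvOccCnt, pv_find_nil sp hs]; rfl
    | cons c t =>
      have hk := pv_sep_len sp hs
      by_cases hp : sp.isPrefixOf (c :: t) = true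
      · have hstep : PySem.Chars.count.go sp (fuel + 1) (c :: t) acc
            = PySem.Chars.count.go sp fuel ((c :: t).drop sp.length) (acc + 1) := by
          show (if sp.isPrefixOf (c :: t) then PySem.Chars.count.go sp fuel ((c :: t).drop sp.length) (acc + 1)
                else PySem.Chars.count.go sp fuel t acc) = _
          rw [if_pos hp]
        have hf0 : PySem.Chars.find (c :: t) sp = 0 := pv_find_cons_prefix sp c t hp
        have hdl : ((c :: t).drop sp.length).length ≤ fuel := by simp at h ⊢; omega
        rw [hstep, ih _ (acc + 1) hdl]
        have hR : pvOccCnt sp ((c :: t).length + 1) (c :: t)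
            = pvOccCnt sp ((c :: t).length) ((c :: t).drop sp.length) + 1 := by
          rw [show (c :: t).length + 1 = (c :: t).length + 1 from rfl, pvOccCnt_succ, hf0]
          norm_num
        rw [hR]
        have : pvOccCnt sp (((c :: t).drop sp.length).length + 1) ((c :: t).drop sp.length)
            = pvOccCnt sp ((c :: t).length) ((c :: t).drop sp.length) := by
          apply pv_occCnt_irrel sp hs <;> simp <;> omega
        rw [this]
        omega
      · have hstep : PySem.Chars.count.go sp (fuel + 1) (c :: t) acc
            = PySem.Chars.count.go sp fuel t acc := by
          show (if sp.isPrefixOf (c :: t) then PySem.Chars.count.go sp fuel ((c :: t).drop sp.length) (acc + 1)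
                else PySem.Chars.count.go sp fuel t acc) = _
          rw [if_neg (by simpa using hp)]
        rw [hstep, ih t acc (by simp at h; omega)]
        congr 1
        have hfl := pv_find_cons_not_prefix sp c t hp
        by_cases hq : PySem.Chars.find t sp < 0
        · have hneg : PySem.Chars.find (c :: t) sp < 0 := by rw [hfl]; simp [hq]
          simp [pvOccCnt, hq, hneg]
        · have hge : 0 ≤ PySem.Chars.find t sp := by omega
          have hfl2 : PySem.Chars.find (c :: t) sp = PySem.Chars.find t sp + 1 := by
            rw [hfl]; simp [hq]
          obtain ⟨hle, -⟩ := pv_find_facts sp t hs hq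
          have hnneg : ¬ PySem.Chars.find (c :: t) sp < 0 := by omega
          have htn : (PySem.Chars.find (c :: t) sp).toNat = (PySem.Chars.find t sp).toNat + 1 := by
            omega
          have hdd : (c :: t).drop ((PySem.Chars.find (c :: t) sp).toNat + sp.length)
              = t.drop ((PySem.Chars.find t sp).toNat + sp.length) := by
            rw [htn]
            have : (PySem.Chars.find t sp).toNat + 1 + sp.length
                = ((PySem.Chars.find t sp).toNat + sp.length) + 1 := by omega
            rw [this, List.drop_succ_cons]
          show pvOccCnt sp (t.length + 1) t = pvOccCnt sp ((t.length + 1) + 1) (c :: t)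
          rw [pvOccCnt_succ, pvOccCnt_succ, if_neg hnneg, if_neg hq, hdd]
          congr 1
          apply pv_occCnt_irrel sp hs <;> simp <;> omega

theorem pv_count_occCnt (sp l : List Char) (hs : sp ≠ []) :
    PySem.Chars.count l sp = pvOccCnt sp (l.length + 1) l := by
  have hne : sp.isEmpty = false := by cases sp <;> simp_all
  show (if sp.isEmpty then l.length + 1 else PySem.Chars.count.go sp l.length l 0) = _
  rw [hne]
  simpa using pv_go_occCnt sp hs l.length l 0 (le_refl _)

-- find on a prefix: the first occurrence survives the cut exactly when it fits
theorem pv_find_eq (sp l : List Char) (k : Nat) (h1 : sp <+: l.drop k)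
    (h2 : ∀ i < k, ¬ sp <+: l.drop i) : PySem.Chars.find l sp = (k : Int) := by
  obtain ⟨t, ht⟩ := h1
  have hinf : sp <:+: l := by
    refine ⟨l.take k, t, ?_⟩
    rw [List.append_assoc, ht, List.take_append_drop]
  have hge : 0 ≤ PySem.Chars.find l sp := (PySem.Chars.find_nonneg_iff _ _).mpr hinf
  obtain ⟨hpre, hmin⟩ := PySem.Chars.find_spec (s := l) (sub := sp) hge
  set q := (PySem.Chars.find l sp).toNat with hq
  have hqk : ¬ q < k := fun hlt => h2 q hlt hpre
  have hkq : ¬ k < q := fun hlt => hmin k hlt ⟨t, ht⟩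
  omega

theorem pv_find_take (sp l : List Char) (m : Nat) (hs : sp ≠ []) :
    PySem.Chars.find (l.take m) sp =
      if 0 ≤ PySem.Chars.find l sp ∧ (PySem.Chars.find l sp).toNat + sp.length ≤ m
      then PySem.Chars.find l sp else -1 := by
  split_ifs with hc
  · obtain ⟨hge, hfit⟩ := hc
    obtain ⟨hpre, hmin⟩ := PySem.Chars.find_spec (s := l) (sub := sp) hge
    set q := (PySem.Chars.find l sp).toNat with hq
    have h1 : sp <+: (l.take m).drop q := by
      rw [List.drop_take]
      exact List.prefix_take_iff.mpr ⟨hpre, by omega⟩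
    have h2 : ∀ i < q, ¬ sp <+: (l.take m).drop i := by
      intro i hi hcon
      rw [List.drop_take] at hcon
      exact hmin i hi (List.prefix_take_iff.mp hcon).1
    have := pv_find_eq sp (l.take m) q h1 h2
    rw [this, hq]
    exact Int.toNat_of_nonneg hge
  · by_contra hne
    have hge : 0 ≤ PySem.Chars.find (l.take m) sp := by
      have := PySem.Chars.neg_one_le_find (s := l.take m) (sub := sp)
      omega
    obtain ⟨hpre, -⟩ := PySem.Chars.find_spec (s := l.take m) (sub := sp) hge
    set r := (PySem.Chars.find (l.take m) sp).toNat with hr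
    rw [List.drop_take] at hpre
    obtain ⟨hpl, hlen⟩ := List.prefix_take_iff.mp hpre
    have hge0 : 0 ≤ PySem.Chars.find l sp :=
      (PySem.Chars.find_nonneg_iff _ _).mpr (by
        obtain ⟨t, ht⟩ := hpl
        exact ⟨l.take r, t, by rw [List.append_assoc, ht, List.take_append_drop]⟩)
    obtain ⟨-, hmin⟩ := PySem.Chars.find_spec (s := l) (sub := sp) hge0
    have hqr : ¬ r < (PySem.Chars.find l sp).toNat := fun hlt => hmin r hlt hpl
    have h3 := PySem.Chars.find_le_length (s := l.take m) (sub := sp)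
    have h4 : (l.take m).length ≤ m := by simp
    exact hc ⟨hge0, by omega⟩

-- occurrences of the prefix cs.take n are exactly the greedy occurrences that fit in n
theorem pv_occCnt_take (cs sp : List Char) (hs : sp ≠ []) :
    ∀ (f s n : Nat), s ≤ n →
      pvOccCnt sp f ((cs.drop s).take (n - s))
        = ((pvGreedyOcc cs sp f s).filter fun g => g + sp.length ≤ n).length := by
  intro f
  induction f with
  | zero => intro s n hsn; simp [pvOccCnt, pvGreedyOcc]
  | succ f ih =>
    intro s n hsn
    have hk := pv_sep_len sp hs
    have hft := pv_find_take sp (cs.drop s) (n - s) hs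
    by_cases hneg : PySem.Chars.find (cs.drop s) sp < 0
    · have hfneg : PySem.Chars.find ((cs.drop s).take (n - s)) sp = -1 := by
        rw [hft, if_neg (by omega)]
      have hgr : pvGreedyOcc cs sp (f + 1) s = [] := by
        simp only [pvGreedyOcc]; rw [if_pos hneg]
      rw [pvOccCnt_succ, hfneg, if_pos (by norm_num), hgr]
      simp
    · set q := (PySem.Chars.find (cs.drop s) sp).toNat with hq
      have hge : 0 ≤ PySem.Chars.find (cs.drop s) sp := by omega
      have hgr : pvGreedyOcc cs sp (f + 1) s
          = (s + q) :: pvGreedyOcc cs sp f (s + q + sp.length) := by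
        simp only [pvGreedyOcc]; rw [if_neg hneg]
      obtain ⟨hle, -⟩ := pv_find_facts sp (cs.drop s) hs hneg
      by_cases hfit : q + sp.length ≤ n - s
      · have hfq : PySem.Chars.find ((cs.drop s).take (n - s)) sp
            = PySem.Chars.find (cs.drop s) sp := by
          rw [hft, if_pos ⟨hge, by omega⟩]
        have hdt : ((cs.drop s).take (n - s)).drop (q + sp.length)
            = (cs.drop (s + q + sp.length)).take (n - (s + q + sp.length)) := by
          rw [List.drop_take, List.drop_drop]
          congr 1
          · omega
          · congr 1; omega
        rw [pvOccCnt_succ, hfq, if_neg hneg, ← hq, hdt, ih (s + q + sp.length) n (by omega), hgr]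
        rw [List.filter_cons_of_pos (by simp only [decide_eq_true_eq]; omega)]
        simp
      · have hfneg : PySem.Chars.find ((cs.drop s).take (n - s)) sp = -1 := by
          rw [hft, if_neg (by omega)]
        have hall : (pvGreedyOcc cs sp f (s + q + sp.length)).filter
            (fun g => decide (g + sp.length ≤ n)) = [] := by
          apply List.filter_eq_nil_iff.mpr
          intro g hg
          have := pv_greedy_ge cs sp f _ g hg
          simp only [decide_eq_true_eq]
          omega
        rw [pvOccCnt_succ, hfneg, if_pos (by norm_num), hgr]
        rw [List.filter_cons_of_neg (by intro hcon; simp only [decide_eq_true_eq] at hcon; omega),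
          hall]
        rfl

theorem pv_count_take_filter (cs sp : List Char) (hs : sp ≠ []) (n : Nat) (hn : n ≤ cs.length) :
    PySem.Chars.count (cs.take n) sp
      = ((pvGreedyOcc cs sp (cs.length + 1) 0).filter fun g => g + sp.length ≤ n).length := by
  rw [pv_count_occCnt sp (cs.take n) hs]
  have h0 : cs.take n = (cs.drop 0).take (n - 0) := by simp
  rw [pv_occCnt_irrel sp hs ((cs.take n).length + 1) (cs.length + 1) (cs.take n)
      (by omega) (by simp only [List.length_take]; omega), h0,
    pv_occCnt_take cs sp hs (cs.length + 1) 0 n (by omega)]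

-- counting split: #(g ≤ p) = #(g < p) + #(g = p)
theorem pv_countP_split (l : List Nat) (p : Nat) :
    l.countP (fun g => decide (g ≤ p)) = l.countP (fun g => decide (g < p)) + l.count p := by
  induction l with
  | nil => simp
  | cons x t ih =>
    simp only [List.countP_cons, List.count_cons, ih]
    by_cases he : x = p
    · simp [he]; omega
    · by_cases hx : x ≤ p
      · simp [beq_iff_eq, he, hx, (by omega : x < p)]; omega
      · simp [beq_iff_eq, he, hx, (by omega : ¬ x < p)]
        all_goals omega

-- membership in the greedy list, read off the two prefix counts
theorem pv_mem_greedy_iff_count (cs sp : List Char) (hs : sp ≠ []) (p : Nat)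
    (hle : p + sp.length ≤ cs.length) :
    (PySem.Chars.count (cs.take (p + sp.length)) sp
        = PySem.Chars.count (cs.take (p + sp.length - 1)) sp)
      ↔ p ∉ pvGreedyOcc cs sp (cs.length + 1) 0 := by
  have hk := pv_sep_len sp hs
  set G := pvGreedyOcc cs sp (cs.length + 1) 0 with hG
  have h1 := pv_count_take_filter cs sp hs (p + sp.length) (by omega)
  have h2 := pv_count_take_filter cs sp hs (p + sp.length - 1) (by omega)
  have e1 : (G.filter fun g => g + sp.length ≤ p + sp.length)
      = G.filter (fun g => decide (g ≤ p)) :=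
    List.filter_congr (fun g _ => decide_eq_decide.mpr (by omega))
  have e2 : (G.filter fun g => g + sp.length ≤ p + sp.length - 1)
      = G.filter (fun g => decide (g < p)) :=
    List.filter_congr (fun g _ => decide_eq_decide.mpr (by omega))
  have hnd : G.Nodup := (pv_greedy_sorted cs sp hs _ _).imp (fun h => Nat.ne_of_lt h)
  rw [h1, h2, e1, e2, ← List.countP_eq_length_filter, ← List.countP_eq_length_filter,
    pv_countP_split G p]
  constructor
  · intro h hmem
    have : G.count p ≥ 1 := List.count_pos_iff.mpr hmem
    omega
  · intro h
    have : G.count p = 0 := List.count_eq_zero.mpr h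
    omega

-- D_ unfolding: the count condition is exactly 'the leftmost valid split is skipped by the scan'
theorem pv_D_iff (chain_name sep : String) (zs : List String) (hs : sep.toList ≠ []) :
    D_split_zone_pair_py chain_name sep zs ↔
      ∃ p, pvMinValid chain_name.toList sep.toList zs = some p ∧
        p ∉ pvGreedyOcc chain_name.toList sep.toList (chain_name.toList.length + 1) 0 := by
  unfold D_split_zone_pair_py
  constructor
  · rintro ⟨p, hp, hcnt⟩
    rw [Option.mem_def] at hp
    have hval := (pv_minValid_some chain_name.toList sep.toList zs p hs hp).1
    have hle := pv_valid_le chain_name.toList sep.toList zs p hs hval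
    exact ⟨p, hp, (pv_mem_greedy_iff_count chain_name.toList sep.toList hs p hle).mp hcnt⟩
  · rintro ⟨p, hp, hnot⟩
    have hval := (pv_minValid_some chain_name.toList sep.toList zs p hs hp).1
    have hle := pv_valid_le chain_name.toList sep.toList zs p hs hval
    exact ⟨p, Option.mem_def.mpr hp,
      (pv_mem_greedy_iff_count chain_name.toList sep.toList hs p hle).mpr hnot⟩

-- main agreement outside D_
theorem pv_main (chain_name sep : String) (zs : List String) (hpre : sep ≠ "")
    (hD : ¬ D_split_zone_pair_py chain_name sep zs) :
    split_zone_pair_py chain_name sep zs = split_zone_pair_py_alt chain_name sep zs := by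
  have hsl : sep.toList ≠ [] := by
    intro h
    exact hpre (String.toList_eq_nil_iff.mp h)
  set cs := chain_name.toList with hcs
  set sp := sep.toList with hsp
  set G := pvGreedyOcc cs sp (cs.length + 1) 0 with hG
  rw [pv_A_char chain_name sep zs hsl, pv_B_char chain_name sep zs hsl]
  cases hV : pvMinValid cs sp zs with
  | none =>
    simp only [Option.map_none]
    apply pv_firstNat_none
    intro p hp hcond
    have hocc : sp <+: cs.drop p := pv_greedy_occ cs sp hsl _ _ p hp
    have hval := pv_valid_of_occ_mem cs sp zs p hocc hcond.1 hcond.2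
    have := pv_minValid_none cs sp zs hsl hV p
    rw [hval] at this; cases this
  | some p =>
    have hpG : p ∈ G := by
      by_contra hn
      exact hD ((pv_D_iff chain_name sep zs hsl).mpr ⟨p, hV, hn⟩)
    obtain ⟨hvalp, hminp⟩ := pv_minValid_some cs sp zs p hsl hV
    have hmem := pv_valid_mem cs sp zs p hvalp
    simp only [Option.map_some]
    apply pv_firstNat_eq cs sp zs G p (pv_greedy_sorted cs sp hsl _ _) hpG hmem
    intro q hq hlt hcond
    have hocc : sp <+: cs.drop q := pv_greedy_occ cs sp hsl _ _ q hq
    have hval := pv_valid_of_occ_mem cs sp zs q hocc hcond.1 hcond.2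
    have := hminp q hval
    omega

-- strict difference inside D_
theorem pv_tight (chain_name sep : String) (zs : List String) (hpre : sep ≠ "")
    (hD : D_split_zone_pair_py chain_name sep zs) :
    split_zone_pair_py chain_name sep zs ≠ split_zone_pair_py_alt chain_name sep zs := by
  have hsl : sep.toList ≠ [] := by
    intro h
    exact hpre (String.toList_eq_nil_iff.mp h)
  set cs := chain_name.toList with hcs
  set sp := sep.toList with hsp
  set G := pvGreedyOcc cs sp (cs.length + 1) 0 with hG
  obtain ⟨p, hV, hpG⟩ := (pv_D_iff chain_name sep zs hsl).mp hD
  obtain ⟨hvalp, hminp⟩ := pv_minValid_some cs sp zs p hsl hV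
  have hlep := pv_valid_le cs sp zs p hsl hvalp
  have hsp1 := pv_sep_len sp hsl
  rw [pv_A_char chain_name sep zs hsl, pv_B_char chain_name sep zs hsl, hV]
  simp only [Option.map_some]
  rcases pv_firstNat_cases cs sp zs G with h | ⟨g, hg, he, hc⟩
  · rw [h]; simp
  · rw [he]
    have hocc : sp <+: cs.drop g := pv_greedy_occ cs sp hsl _ _ g hg
    have hvalg := pv_valid_of_occ_mem cs sp zs g hocc hc.1 hc.2
    have hpg : p ≤ g := hminp g hvalg
    have hne : p ≠ g := by rintro rfl; exact hpG hg
    have hleg := pv_valid_le cs sp zs g hsl hvalg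
    intro heq
    have h1 : String.ofList (cs.take g) = String.ofList (cs.take p) := by
      have := Option.some.inj heq
      exact congrArg Prod.fst this
    have h2 : cs.take g = cs.take p := by
      have := congrArg String.toList h1
      simpa [String.toList_ofList] using this
    have h3 : (cs.take g).length = (cs.take p).length := by rw [h2]
    simp at h3
    omega

-- ===== VERDICT (by name: the statements are the Claim_ definitions above) =====
theorem split_zone_pair_py_spec : Claim_unchanged_split_zone_pair_py := by
  intro chain_name sep known_zones _ hpre hD
  exact pv_main chain_name sep known_zones hpre hD

theorem split_zone_pair_py_changed : Claim_changed_split_zone_pair_py := by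
  unfold Claim_changed_split_zone_pair_py; decide

theorem split_zone_pair_py_tight : Claim_exact_split_zone_pair_py := by
  intro chain_name sep known_zones _ hpre hD
  exact pv_tight chain_name sep known_zones hpre hD
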